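-- pv_equiv track=rewrite | github.com/tszyrowski/algoex_works | cody/longest_p.py | solution
-- ===== SOURCE A (Python) =====
-- def solution(X, Y, A):
--     N = len(A)
--     result = -1
--     nX = 0
--     nY = 0
--     for i in range(N):
--         if A[i] == X:
--             nX += 1
--         elif A[i] == Y:
--             nY += 1
--         if nX == nY:
--             result = i
--     return result
-- ===== SOURCE B (Python) =====
-- def solution(X, Y, A):
--     # Pass 1: prefix balances (count of X minus count of Y over A[0..i]).
--     bal = []
--     b = 0
--     for a in A:
--         if a == X:
--             b += 1
--         elif a == Y:
--             b -= 1
--         bal.append(b)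
--     # Pass 2: scan backward for the last index with balance zero.
--     for i in range(len(bal) - 1, -1, -1):
--         if bal[i] == 0:
--             return i
--     return -1
-- ===== Notes on version B (the rewrite author's own statement) =====
-- stated objective: alternative
-- what changed: Replaces A's single forward loop with two running counters and a repeatedly overwritten result by two passes: first build the list of prefix X-minus-Y balances, then scan it backward and return the first (i.e. last) index whose balance is zero.
import Mathlib
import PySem

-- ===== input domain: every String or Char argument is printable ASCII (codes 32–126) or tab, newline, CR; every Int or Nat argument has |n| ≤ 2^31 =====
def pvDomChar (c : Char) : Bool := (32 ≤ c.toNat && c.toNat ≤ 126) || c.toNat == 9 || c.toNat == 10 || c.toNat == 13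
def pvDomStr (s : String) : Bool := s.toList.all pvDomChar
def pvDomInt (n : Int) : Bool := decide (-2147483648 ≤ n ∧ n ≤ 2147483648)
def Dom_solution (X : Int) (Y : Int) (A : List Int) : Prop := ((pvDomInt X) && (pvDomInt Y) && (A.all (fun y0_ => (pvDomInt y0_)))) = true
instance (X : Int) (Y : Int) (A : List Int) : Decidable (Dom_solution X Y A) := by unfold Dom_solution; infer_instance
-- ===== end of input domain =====

-- B replaces A's single loop (two counters, overwritten result) by a build-prefix-balances pass
-- plus a backward scan for the last zero balance; same O(n) cost, different decomposition.

-- ===== PORT A =====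
-- A's for-loop over i in range(N) with state (result, nX, nY), transliterated as structural
-- recursion over the list carrying the index i.
def solLoopA (X : Int) (Y : Int) : List Int → Int → Int → Int → Int → Int
  | [], _, result, _, _ => result
  | a :: t, i, result, nX, nY =>
      let nX' := if a = X then nX + 1 else nX
      let nY' := if a = X then nY else if a = Y then nY + 1 else nY
      let result' := if nX' = nY' then i else result
      solLoopA X Y t (i + 1) result' nX' nY'

def solution (X : Int) (Y : Int) (A : List Int) : Int :=
  solLoopA X Y A 0 (-1) 0 0

-- ===== PORT B =====
-- pass 1 of Source B: the list of prefix balances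
def balances (X : Int) (Y : Int) (b : Int) : List Int → List Int
  | [] => []
  | a :: t =>
      let b' := if a = X then b + 1 else if a = Y then b - 1 else b
      b' :: balances X Y b' t

-- pass 2 of Source B: scan indices len-1 … 0; here realised by recursing on the reversed list
def findBack : List Int → Int → Int
  | [], _ => -1
  | b :: t, i => if b = 0 then i else findBack t (i - 1)

def solution_alt (X : Int) (Y : Int) (A : List Int) : Int :=
  let bal := balances X Y 0 A
  findBack bal.reverse ((bal.length : Int) - 1)

-- ===== PRECONDITION & SPEC =====
def Spec_solution (X : Int) (Y : Int) (A : List Int) (out : Int) : Prop := out = solution_alt X Y A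
instance (X : Int) (Y : Int) (A : List Int) (out : Int) : Decidable (Spec_solution X Y A out) := by unfold Spec_solution; infer_instance

-- ===== CLAIM (what is proved, stated in full; the proofs are below) =====
def Claim_equal_solution : Prop := ∀ (X : Int) (Y : Int) (A : List Int), Dom_solution X Y A → Spec_solution X Y A (solution X Y A)

-- ===== LEMMAS AND PROOFS =====

-- findBack with an arbitrary default, for the induction
def fb : List Int → Int → Int → Int
  | [], _, d => d
  | b :: t, i, d => if b = 0 then i else fb t (i - 1) d

theorem fb_default (l : List Int) (i : Int) : fb l i (-1) = findBack l i := by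
  induction l generalizing i with
  | nil => rfl
  | cons b t ih => simp [fb, findBack, ih]

theorem balances_length (X Y b : Int) (l : List Int) :
    (balances X Y b l).length = l.length := by
  induction l generalizing b with
  | nil => rfl
  | cons a t ih => simp [balances, ih]

theorem fb_append_single (u : List Int) (c j d : Int) :
    fb (u ++ [c]) j d = fb u j (if c = 0 then j - u.length else d) := by
  induction u generalizing j with
  | nil => simp [fb]
  | cons b t ih =>
      simp only [List.cons_append, fb, ih, List.length_cons]
      split_ifs <;> simp <;> try ring_nf

theorem loopA_eq_fb (X Y : Int) (l : List Int) (i result nX nY : Int) :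
    solLoopA X Y l i result nX nY
      = fb (balances X Y (nX - nY) l).reverse (i + l.length - 1) result := by
  induction l generalizing i result nX nY with
  | nil => simp [solLoopA, balances, fb]
  | cons a t ih =>
      simp only [solLoopA, balances, List.reverse_cons]
      rw [fb_append_single, List.length_reverse, balances_length]
      set b' := if a = X then nX - nY + 1 else if a = Y then nX - nY - 1 else nX - nY with hb'
      set nX' := if a = X then nX + 1 else nX with hnX'
      set nY' := if a = X then nY else if a = Y then nY + 1 else nY with hnY'
      have hdiff : nX' - nY' = b' := by
        rw [hb', hnX', hnY']; split_ifs <;> ring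
      rw [ih, hdiff]
      simp only [List.length_cons]
      congr 1
      · push_cast; ring
      · push_cast
        split_ifs with h1 h2 h2 <;> omega

-- ===== VERDICT (by name: the statement is the Claim_ definition above) =====
theorem solution_spec : Claim_equal_solution := by
  intro X Y A _
  unfold Spec_solution solution solution_alt
  rw [loopA_eq_fb]
  simp only [sub_zero, balances_length]
  rw [zero_add, fb_default]
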